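-- pv_equiv track=rewrite | github.com/SDET-SOLOMAN/code_wars_python | kata_6s/dupe_encoder.py | duplicate_encode3
-- ===== SOURCE A (Python) =====
-- def duplicate_encode3(word):
--     my_dict = dict()
--     word = word.lower()
--
--     for char in word:
--         if char in my_dict:
--             my_dict[char] = ')'
--         else:
--             my_dict[char] = '('
--
--     return ''.join(my_dict[char] for char in word)
-- ===== SOURCE B (Python) =====
-- def duplicate_encode3(word):
--     w = word.lower()
--     s = sorted(w)
--     dups = {a for a, b in zip(s, s[1:]) if a == b}
--     return ''.join(')' if c in dups else '(' for c in w)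
-- ===== Notes on version B (the rewrite author's own statement) =====
-- stated objective: alternative
-- what changed: Replaced the dict first/repeat marking pass with sort-then-adjacent-scan: duplicated characters are found as equal neighbours in sorted(w) and each char of w is classified by membership in that set.
import Mathlib
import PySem

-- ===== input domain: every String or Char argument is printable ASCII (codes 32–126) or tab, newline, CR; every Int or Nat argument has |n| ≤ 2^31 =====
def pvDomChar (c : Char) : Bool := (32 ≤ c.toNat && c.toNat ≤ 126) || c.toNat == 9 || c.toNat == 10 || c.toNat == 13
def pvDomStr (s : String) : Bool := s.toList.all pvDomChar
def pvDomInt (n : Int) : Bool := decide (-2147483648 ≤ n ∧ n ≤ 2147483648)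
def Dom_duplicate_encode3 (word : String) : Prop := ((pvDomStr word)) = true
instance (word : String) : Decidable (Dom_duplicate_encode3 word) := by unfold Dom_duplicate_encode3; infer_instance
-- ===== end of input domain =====

-- B replaces A's dict first/repeat marking by sort-then-adjacent-scan; alternative, not faster.

-- ===== PORT A =====
-- dict build loop: '(' on first sight, ')' on a repeat; then join the lookups.
-- my_dict[char] never misses in Python (every char of word was inserted), so getD's default is never used.
def duplicate_encode3 (word : String) : String :=
  let w := PySem.Chars.lower word.toList
  let d := w.foldl (fun d c => if d.contains c then d.insert c ')' else d.insert c '(')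
             (PySem.Dict.empty : PySem.Dict Char Char)
  String.mk (w.map (fun c => d.getD c '('))

-- ===== PORT B =====
-- sort the lowered word; duplicated chars are exactly the equal adjacent pairs; classify by set membership.
def duplicate_encode3_alt (word : String) : String :=
  let w := PySem.Chars.lower word.toList
  let s := PySem.List.sorted w (fun c => c) false
  let dups : PySem.Set Char :=
    PySem.Set.ofList (((s.zip s.tail).filter (fun p => p.1 == p.2)).map Prod.fst)
  String.mk (w.map (fun c => if dups.contains c then ')' else '('))

-- ===== PRECONDITION & SPEC =====
def Spec_duplicate_encode3 (word : String) (out : String) : Prop := out = duplicate_encode3_alt word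
instance (word : String) (out : String) : Decidable (Spec_duplicate_encode3 word out) := by unfold Spec_duplicate_encode3; infer_instance

-- ===== CLAIM (what is proved, stated in full; the proofs are below) =====
def Claim_equal_duplicate_encode3 : Prop := ∀ (word : String), Dom_duplicate_encode3 word → Spec_duplicate_encode3 word (duplicate_encode3 word)

-- ===== LEMMAS AND PROOFS =====

-- A's fold leaves untouched keys alone.
theorem dupenc_fold_not_mem (l : List Char) (d : PySem.Dict Char Char) (c : Char) (h : c ∉ l) :
    (l.foldl (fun d c => if d.contains c then d.insert c ')' else d.insert c '(') d).get? c = d.get? c := by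
  induction l generalizing d with
  | nil => rfl
  | cons a t ih =>
    simp only [List.mem_cons, not_or] at h
    simp only [List.foldl_cons]
    rw [ih _ h.2]
    split <;> rw [PySem.Dict.get?_insert_of_ne _ _ h.1]

-- Characterisation of A's dict: a key seen in l maps to ')' iff it was already present or repeats in l.
theorem dupenc_fold_mem (l : List Char) (d : PySem.Dict Char Char) (c : Char) (h : c ∈ l) :
    (l.foldl (fun d c => if d.contains c then d.insert c ')' else d.insert c '(') d).get? c
      = some (if d.contains c ∨ 2 ≤ l.count c then ')' else '(') := by
  induction l generalizing d with
  | nil => cases h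
  | cons a t ih =>
    simp only [List.foldl_cons]
    by_cases hct : c ∈ t
    · rw [ih _ hct]
      congr 1
      by_cases hca : c = a
      · subst hca
        have h1 : 1 ≤ t.count c := List.count_pos_iff.mpr hct
        have h2 : 2 ≤ (c :: t).count c := by rw [List.count_cons_self]; omega
        have hthis : (if d.contains c then d.insert c ')' else d.insert c '(').contains c = true := by
          split <;> exact PySem.Dict.contains_insert_self _ _ _
        rw [if_pos (Or.inl hthis), if_pos (Or.inr h2)]
      · have hc : (if d.contains a then d.insert a ')' else d.insert a '(').contains c = d.contains c := by
          split <;> simp [PySem.Dict.contains_insert, hca]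
        rw [hc]
        simp [Ne.symm hca]
    · have hca : c = a := by
        rcases List.mem_cons.mp h with h' | h'
        · exact h'
        · exact absurd h' hct
      subst hca
      rw [dupenc_fold_not_mem _ _ _ hct]
      have hcnt : (c :: t).count c = 1 := by
        rw [List.count_cons_self, List.count_eq_zero_of_not_mem hct]
      rw [hcnt]
      by_cases hd : d.contains c = true
      · simp [hd, PySem.Dict.get?_insert_self]
      · simp [hd, PySem.Dict.get?_insert_self]

-- B's adjacent-pair scan on a sorted list finds exactly the repeated elements.
theorem dupenc_adj_mem (s : List Char) (hs : s.Pairwise (· ≤ ·)) (c : Char) :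
    c ∈ ((s.zip s.tail).filter (fun p => p.1 == p.2)).map Prod.fst ↔ 2 ≤ s.count c := by
  induction s with
  | nil => simp
  | cons a rest ih =>
    cases rest with
    | nil => simp [List.count_cons]; split <;> omega
    | cons b t =>
      have hp := List.pairwise_cons.mp hs
      have htail : (b :: t).Pairwise (· ≤ ·) := hp.2
      have hab' : a ≤ b := hp.1 b (by simp)
      have ihtail := ih htail
      simp only [List.tail_cons] at ihtail ⊢
      rw [List.zip_cons_cons, List.filter_cons]
      by_cases hab : a = b
      · subst hab
        rw [if_pos (by simp)]
        simp only [List.map_cons, List.mem_cons]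
        constructor
        · rintro (rfl | hm)
          · simp
          · have := ihtail.mp hm
            simp [List.count_cons] at this ⊢
            omega
        · intro h2
          by_cases hca : c = a
          · exact Or.inl hca
          · refine Or.inr (ihtail.mpr ?_)
            simp [List.count_cons, show (a == c) = false by simp [Ne.symm hca]] at h2 ⊢
            omega
      · rw [if_neg (by simp [hab])]
        constructor
        · intro hm
          have := ihtail.mp hm
          simp [List.count_cons] at this ⊢
          omega
        · intro h2
          by_cases hca : c = a
          · subst hca
            exfalso
            have hmem : c ∈ b :: t := by
              by_contra hnm
              rw [show List.count c (c :: b :: t) = List.count c (b :: t) + 1 by simp [List.count_cons],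
                  List.count_eq_zero_of_not_mem hnm] at h2
              omega
            rcases List.mem_cons.mp hmem with h' | h'
            · exact hab h'
            · exact hab (le_antisymm hab' ((List.pairwise_cons.mp htail).1 c h'))
          · apply ihtail.mpr
            rw [show List.count c (a :: b :: t) = List.count c (b :: t) by
              simp [List.count_cons, show (a == c) = false by simp [Ne.symm hca]]] at h2
            exact h2

-- ===== VERDICT (by name: the statement is the Claim_ definition above) =====
theorem duplicate_encode3_spec : Claim_equal_duplicate_encode3 := by
  intro word _
  unfold Spec_duplicate_encode3 duplicate_encode3 duplicate_encode3_alt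
  simp only []
  congr 1
  apply List.map_congr_left
  intro c hc
  set w := PySem.Chars.lower word.toList with hw
  set s := PySem.List.sorted w (fun c => c) false with hsdef
  have hperm : s.Perm w := PySem.List.sorted_perm _ _ _
  have hsorted : s.Pairwise (· ≤ ·) := PySem.List.sorted_pairwise w (fun c => c)
  have hcount : s.count c = w.count c := hperm.count_eq c
  rw [PySem.Dict.getD_eq_get?_getD, dupenc_fold_mem _ _ _ hc]
  simp only [PySem.Dict.contains_empty, Bool.false_eq_true, false_or, Option.getD_some]
  have hmemiff := dupenc_adj_mem s hsorted c
  rw [hcount] at hmemiff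
  by_cases h2 : 2 ≤ w.count c
  · rw [if_pos h2, if_pos ((PySem.Set.contains_iff _ _).mpr ((PySem.Set.mem_ofList _ _).mpr (hmemiff.mpr h2)))]
  · rw [if_neg h2, if_neg (fun hb => h2 (hmemiff.mp ((PySem.Set.mem_ofList _ _).mp ((PySem.Set.contains_iff _ _).mp hb))))]
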